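-- pv_equiv track=rewrite | github.com/JTibs18/LeetCode | GrumpyBookstoreOwner.py | gBookOwner
-- ===== SOURCE A (Python) =====
-- def gBookOwner(customers, grumpy, minutes):
--     # wSum = sum(customers)
--     happy = 0
--     # maxHappy = 0
--     addDiff = 0
--     for index, value in enumerate(customers):
--         # happyMins = 0
--         diff = 0
--         if (grumpy[index] == 0):
--             happy = happy + value
--         for i in range(minutes):
--             if (index <= len(customers) - minutes):
--                 if (grumpy[index + i] != 0):
--                     diff = diff + customers[index + i]
--                 # happyMins = happyMins + customers[index + i]
--         if (diff > addDiff):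
--             # maxHappy = happyMins
--             addDiff = diff
--     happy = happy + addDiff
--     return happy
-- ===== SOURCE B (Python) =====
-- def gBookOwner(customers, grumpy, minutes):
--     n = len(customers)
--     base = 0
--     for c, g in zip(customers, grumpy):
--         if g == 0:
--             base = base + c
--     if minutes <= 0 or minutes > n:
--         return base
--     w = 0
--     for i in range(minutes):
--         if grumpy[i] != 0:
--             w = w + customers[i]
--     best = w
--     for i in range(minutes, n):
--         w = w + (customers[i] if grumpy[i] != 0 else 0) - (customers[i - minutes] if grumpy[i - minutes] != 0 else 0)
--         if w > best:
--             best = w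
--     return base + (best if best > 0 else 0)
-- ===== Notes on version B (the rewrite author's own statement) =====
-- stated objective: faster
-- what changed: Replaces A's per-position re-summation of the minutes-long window (nested loop) with one sliding-window pass that updates the window sum incrementally, plus a single zip pass for the base count.
import Mathlib
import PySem

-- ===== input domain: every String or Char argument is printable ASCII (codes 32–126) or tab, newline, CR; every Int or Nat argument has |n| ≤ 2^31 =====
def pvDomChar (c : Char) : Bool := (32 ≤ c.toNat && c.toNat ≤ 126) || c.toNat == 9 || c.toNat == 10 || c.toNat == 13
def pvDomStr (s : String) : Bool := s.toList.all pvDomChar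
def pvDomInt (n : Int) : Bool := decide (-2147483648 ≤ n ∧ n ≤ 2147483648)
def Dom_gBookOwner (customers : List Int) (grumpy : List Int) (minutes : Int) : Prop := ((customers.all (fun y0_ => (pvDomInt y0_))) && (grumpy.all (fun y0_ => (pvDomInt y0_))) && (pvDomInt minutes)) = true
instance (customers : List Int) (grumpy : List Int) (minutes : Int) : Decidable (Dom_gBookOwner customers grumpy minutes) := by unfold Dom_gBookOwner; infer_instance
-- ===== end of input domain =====

-- B replaces A's per-position re-summation of the minutes-window (O(n·minutes)) by a
-- single sliding-window pass with incremental sum update (O(n)); return values agree.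

-- ===== PORT A =====
def gBookOwner (customers : List Int) (grumpy : List Int) (minutes : Int) : Int :=
  let s := (PySem.List.enumerate customers).foldl (fun (s : Int × Int) (p : Int × Int) =>
    let happy := if PySem.List.pyGetD grumpy p.1 0 = 0 then s.1 + p.2 else s.1
    let diff := (PySem.List.pyRange 0 minutes).foldl (fun diff i =>
        if p.1 ≤ PySem.List.len customers - minutes then
          (if PySem.List.pyGetD grumpy (p.1 + i) 0 ≠ 0 then diff + PySem.List.pyGetD customers (p.1 + i) 0 else diff)
        else diff) 0
    (happy, if diff > s.2 then diff else s.2)) (0, 0)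
  s.1 + s.2

-- ===== PORT B =====
def gBookOwner_alt (customers : List Int) (grumpy : List Int) (minutes : Int) : Int :=
  let n : Int := customers.length
  let base := (List.zip customers grumpy).foldl (fun base p => if p.2 = 0 then base + p.1 else base) 0
  if minutes ≤ 0 ∨ minutes > n then base
  else
    let w := (PySem.List.pyRange 0 minutes).foldl (fun w i =>
        if PySem.List.pyGetD grumpy i 0 ≠ 0 then w + PySem.List.pyGetD customers i 0 else w) 0
    let s := (PySem.List.pyRange minutes n).foldl (fun (s : Int × Int) i =>
        let w := s.1 + (if PySem.List.pyGetD grumpy i 0 ≠ 0 then PySem.List.pyGetD customers i 0 else 0)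
                     - (if PySem.List.pyGetD grumpy (i - minutes) 0 ≠ 0 then PySem.List.pyGetD customers (i - minutes) 0 else 0)
        (w, if w > s.2 then w else s.2)) (w, w)
    base + (if s.2 > 0 then s.2 else 0)

-- ===== PRECONDITION & SPEC =====
-- Pre_ excludes inputs with len(grumpy) < len(customers), on which Python A raises IndexError.
def Pre_gBookOwner (customers : List Int) (grumpy : List Int) (minutes : Int) : Prop :=
  customers.length ≤ grumpy.length
instance (customers : List Int) (grumpy : List Int) (minutes : Int) : Decidable (Pre_gBookOwner customers grumpy minutes) := by unfold Pre_gBookOwner; infer_instance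
def pvWitness_gBookOwner : List Int × List Int × Int := ([1, 0, 1, 2, 1, 1, 7, 5], [0, 1, 0, 1, 0, 1, 0, 1], 3)

def Spec_gBookOwner (customers : List Int) (grumpy : List Int) (minutes : Int) (out : Int) : Prop := out = gBookOwner_alt customers grumpy minutes
instance (customers : List Int) (grumpy : List Int) (minutes : Int) (out : Int) : Decidable (Spec_gBookOwner customers grumpy minutes out) := by unfold Spec_gBookOwner; infer_instance

-- ===== CLAIM (what is proved, stated in full; the proofs are below) =====
def Claim_equal_gBookOwner : Prop := ∀ (customers : List Int) (grumpy : List Int) (minutes : Int), Dom_gBookOwner customers grumpy minutes → Pre_gBookOwner customers grumpy minutes → Spec_gBookOwner customers grumpy minutes (gBookOwner customers grumpy minutes)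

-- ===== LEMMAS AND PROOFS =====

-- the per-position contribution and the window sum, as specifications
def pvT (c g : List Int) (k : Nat) : Int := if g.getD k 0 ≠ 0 then c.getD k 0 else 0
def pvW (c g : List Int) (m j : Nat) : Int := ((List.range m).map (fun i => pvT c g (j + i))).sum

theorem pv_ite_max (a d : Int) : (if d > a then d else a) = max a d := by
  rw [max_def]; split_ifs <;> omega

theorem pv_foldl_max_const {α : Type} (l : List α) (a : Int) (h : 0 ≤ a) :
    l.foldl (fun acc _ => max acc 0) a = a := by
  induction l generalizing a with
  | nil => rfl
  | cons x t ih => simpa [max_eq_left h] using ih a h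

theorem pv_foldl_max_max (f : Nat → Int) (l : List Nat) (b c : Int) :
    l.foldl (fun a j => max a (f j)) (max b c) = max b (l.foldl (fun a j => max a (f j)) c) := by
  induction l generalizing c with
  | nil => rfl
  | cons x t ih => simpa [max_assoc] using ih (max c (f x))

theorem pv_W_succ (c g : List Int) (m j : Nat) :
    pvW c g m (j + 1) = pvW c g m j + pvT c g (j + m) - pvT c g j := by
  have h1 : ((List.range (m + 1)).map (fun i => pvT c g (j + i))).sum
      = pvT c g j + pvW c g m (j + 1) := by
    rw [List.range_succ_eq_map]
    simp only [List.map_cons, List.map_map, List.sum_cons, Nat.add_zero, pvW]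
    congr 2
    apply List.map_congr_left
    intro i _
    simp only [Function.comp_apply]
    congr 1
    omega
  have h2 : ((List.range (m + 1)).map (fun i => pvT c g (j + i))).sum
      = pvW c g m j + pvT c g (j + m) := by
    rw [List.range_succ]
    simp [pvW]
  linarith

theorem pv_base_ind (c : List Int) (g : List Int) (a : Int) (h : c.length ≤ g.length) :
    (List.range c.length).foldl (fun acc k => if g.getD k 0 = 0 then acc + c.getD k 0 else acc) a
    = (List.zip c g).foldl (fun base p => if p.2 = 0 then base + p.1 else base) a := by
  induction c generalizing g a with
  | nil => simp
  | cons x c' ih =>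
    cases g with
    | nil => simp at h
    | cons y g' =>
      rw [List.length_cons, List.range_succ_eq_map, List.foldl_cons, List.foldl_map]
      simp only [List.getD_cons_zero, List.getD_cons_succ, List.zip_cons_cons, List.foldl_cons]
      exact ih g' _ (by simpa using h)

theorem pv_base_eq (c g : List Int) (h : c.length ≤ g.length) :
    (PySem.List.enumerate c).foldl (fun (acc : Int) (p : Int × Int) =>
        if PySem.List.pyGetD g p.1 0 = 0 then acc + p.2 else acc) 0
    = (List.zip c g).foldl (fun base p => if p.2 = 0 then base + p.1 else base) 0 := by
  rw [PySem.List.enumerate_eq_map_pyRange c 0, List.foldl_map, PySem.List.pyRange_one,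
    List.foldl_map]
  simp only [PySem.List.len_eq, Int.sub_zero, Int.toNat_natCast, zero_add,
    PySem.List.pyGetD_natCast]
  exact pv_base_ind c g 0 h

theorem pv_inner_eq (c g : List Int) (m : Int) (j : Nat) :
    (PySem.List.pyRange 0 m).foldl (fun diff i =>
        if PySem.List.pyGetD g ((j : Int) + i) 0 ≠ 0 then diff + PySem.List.pyGetD c ((j : Int) + i) 0 else diff) 0
    = pvW c g m.toNat j := by
  rw [PySem.List.pyRange_one, List.foldl_map]
  simp only [Int.sub_zero, zero_add]
  rw [PySem.List.foldl_congr_mem _ _ (fun (acc : Int) k => acc + pvT c g (j + k)) _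
    (by
      intro acc k _
      simp only [pvT, ← Int.natCast_add, PySem.List.pyGetD_natCast]
      split_ifs <;> simp)]
  rw [PySem.List.foldl_add]
  simp [pvW]

theorem pv_gain_A (c g : List Int) (m : Int) (hm : 0 < m) (hn : m ≤ (c.length : Int)) :
    (PySem.List.enumerate c).foldl (fun (acc : Int) (p : Int × Int) =>
      if (PySem.List.pyRange 0 m).foldl (fun diff i =>
          if p.1 ≤ PySem.List.len c - m then
            (if PySem.List.pyGetD g (p.1 + i) 0 ≠ 0 then diff + PySem.List.pyGetD c (p.1 + i) 0 else diff)
          else diff) 0 > acc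
      then (PySem.List.pyRange 0 m).foldl (fun diff i =>
          if p.1 ≤ PySem.List.len c - m then
            (if PySem.List.pyGetD g (p.1 + i) 0 ≠ 0 then diff + PySem.List.pyGetD c (p.1 + i) 0 else diff)
          else diff) 0
      else acc) 0
    = (List.range (c.length - m.toNat + 1)).foldl (fun a j => max a (pvW c g m.toNat j)) 0 := by
  rw [PySem.List.enumerate_eq_map_pyRange c 0, List.foldl_map]
  rw [PySem.List.foldl_congr_mem _ _
    (fun (acc : Int) (j : Int) =>
      max acc (if j ≤ (c.length : Int) - m then pvW c g m.toNat j.toNat else 0)) _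
    (by
      intro acc j hj
      have h0 : 0 ≤ j := ((PySem.List.mem_pyRange_one).mp hj).1
      dsimp only
      simp only [PySem.List.len_eq]
      by_cases hc : j ≤ (c.length : Int) - m
      · rw [PySem.List.foldl_congr_mem _ _ (fun (diff : Int) (i : Int) =>
            if PySem.List.pyGetD g (j + i) 0 ≠ 0 then diff + PySem.List.pyGetD c (j + i) 0 else diff) _
          (by intro d i _; rw [if_pos hc])]
        have hinner := pv_inner_eq c g m j.toNat
        rw [Int.toNat_of_nonneg h0] at hinner
        rw [hinner, pv_ite_max, if_pos hc]
      · rw [PySem.List.foldl_congr_mem _ _ (fun (diff : Int) (_ : Int) => diff) _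
          (by intro d i _; rw [if_neg hc])]
        rw [PySem.List.foldl_ignore, pv_ite_max, if_neg hc])]
  rw [PySem.List.pyRange_one, List.foldl_map]
  simp only [PySem.List.len_eq, Int.sub_zero, Int.toNat_natCast, zero_add]
  have hsplit : List.range c.length
      = List.range (c.length - m.toNat + 1)
        ++ (List.range (c.length - (c.length - m.toNat + 1))).map ((c.length - m.toNat + 1) + ·) := by
    rw [← List.range_add]; congr 1; omega
  rw [hsplit, List.foldl_append]
  rw [PySem.List.foldl_congr_mem
    ((List.range (c.length - (c.length - m.toNat + 1))).map ((c.length - m.toNat + 1) + ·))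
    _ (fun (a : Int) (_ : Nat) => max a 0) _
    (by
      intro acc j hj
      obtain ⟨i, _, rfl⟩ := List.mem_map.mp hj
      rw [if_neg (by push_cast; omega :
        ¬ ((((c.length - m.toNat + 1) + i : Nat) : Int) ≤ (c.length : Int) - m))])]
  rw [PySem.List.foldl_congr_mem (List.range (c.length - m.toNat + 1))
    _ (fun (a : Int) (j : Nat) => max a (pvW c g m.toNat j)) _
    (by
      intro acc j hj
      have hj' : j < c.length - m.toNat + 1 := List.mem_range.mp hj
      rw [if_pos (by omega : (j : Int) ≤ (c.length : Int) - m)])]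
  exact pv_foldl_max_const _ _
    (PySem.List.le_foldl_max_int (List.range (c.length - m.toNat + 1)) (fun j => pvW c g m.toNat j) 0).1

theorem pv_gain_A_zero (c g : List Int) (m : Int) (hm : m ≤ 0 ∨ (c.length : Int) < m) :
    (PySem.List.enumerate c).foldl (fun (acc : Int) (p : Int × Int) =>
      if (PySem.List.pyRange 0 m).foldl (fun diff i =>
          if p.1 ≤ PySem.List.len c - m then
            (if PySem.List.pyGetD g (p.1 + i) 0 ≠ 0 then diff + PySem.List.pyGetD c (p.1 + i) 0 else diff)
          else diff) 0 > acc
      then (PySem.List.pyRange 0 m).foldl (fun diff i =>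
          if p.1 ≤ PySem.List.len c - m then
            (if PySem.List.pyGetD g (p.1 + i) 0 ≠ 0 then diff + PySem.List.pyGetD c (p.1 + i) 0 else diff)
          else diff) 0
      else acc) 0 = 0 := by
  rw [PySem.List.foldl_congr_mem _ _ (fun (acc : Int) (_ : Int × Int) => max acc 0) _
    (by
      intro acc p hp
      have hdiff : (PySem.List.pyRange 0 m).foldl (fun diff i =>
          if p.1 ≤ PySem.List.len c - m then
            (if PySem.List.pyGetD g (p.1 + i) 0 ≠ 0 then diff + PySem.List.pyGetD c (p.1 + i) 0 else diff)
          else diff) 0 = 0 := by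
        rcases hm with hm | hm
        · rw [PySem.List.pyRange_one_eq_nil hm]; rfl
        · obtain ⟨k, hk, hpk⟩ := (PySem.List.mem_enumerate_iff c 0 p).mp hp
          have hcond : ¬ (p.1 ≤ PySem.List.len c - m) := by
            rw [hpk]; simp only [PySem.List.len_eq]; omega
          rw [PySem.List.foldl_congr_mem _ _ (fun (diff : Int) (_ : Int) => diff) _
            (by intro acc' i _; rw [if_neg hcond])]
          exact PySem.List.foldl_ignore _ _
      simp only [hdiff, pv_ite_max])]
  exact pv_foldl_max_const _ 0 le_rfl

theorem pv_slide (c g : List Int) (m : Nat) (r : Nat) :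
    (List.range r).foldl (fun (s : Int × Int) k =>
        (s.1 + pvT c g (m + k) - pvT c g k,
          if s.1 + pvT c g (m + k) - pvT c g k > s.2 then s.1 + pvT c g (m + k) - pvT c g k
          else s.2)) (pvW c g m 0, pvW c g m 0)
    = (pvW c g m r, (List.range r).foldl (fun a j => max a (pvW c g m (j + 1))) (pvW c g m 0)) := by
  induction r with
  | zero => rfl
  | succ r ih =>
    rw [List.range_succ, List.foldl_append, List.foldl_append, ih]
    have hw : pvW c g m r + pvT c g (m + r) - pvT c g r = pvW c g m (r + 1) := by
      rw [Nat.add_comm m r]; exact (pv_W_succ c g m r).symm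
    simp only [List.foldl_cons, List.foldl_nil, hw, pv_ite_max]

theorem pv_main (c g : List Int) (m : Int) (h : c.length ≤ g.length) :
    gBookOwner c g m = gBookOwner_alt c g m := by
  simp only [gBookOwner, gBookOwner_alt]
  rw [PySem.List.foldl_prod_mk
    (f := fun (acc : Int) (p : Int × Int) =>
      if PySem.List.pyGetD g p.1 0 = 0 then acc + p.2 else acc)
    (g := fun (acc : Int) (p : Int × Int) =>
      if (PySem.List.pyRange 0 m).foldl (fun diff i =>
          if p.1 ≤ PySem.List.len c - m then
            (if PySem.List.pyGetD g (p.1 + i) 0 ≠ 0 then diff + PySem.List.pyGetD c (p.1 + i) 0 else diff)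
          else diff) 0 > acc
      then (PySem.List.pyRange 0 m).foldl (fun diff i =>
          if p.1 ≤ PySem.List.len c - m then
            (if PySem.List.pyGetD g (p.1 + i) 0 ≠ 0 then diff + PySem.List.pyGetD c (p.1 + i) 0 else diff)
          else diff) 0
      else acc)]
  rw [pv_base_eq c g h]
  by_cases hdeg : m ≤ 0 ∨ (c.length : Int) < m
  · rw [pv_gain_A_zero c g m hdeg, if_pos (by tauto)]
    simp
  · have hm : 0 < m := by omega
    have hn : m ≤ (c.length : Int) := by omega
    rw [pv_gain_A c g m hm hn, if_neg (by omega)]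
    have hw0 := pv_inner_eq c g m 0
    simp only [Nat.cast_zero, zero_add] at hw0
    rw [hw0]
    rw [PySem.List.pyRange_one m ((c.length : Int)), List.foldl_map]
    rw [PySem.List.foldl_congr_mem (List.range (((c.length : Int) - m).toNat)) _
      (fun (s : Int × Int) (k : Nat) =>
        (s.1 + pvT c g (m.toNat + k) - pvT c g k,
          if s.1 + pvT c g (m.toNat + k) - pvT c g k > s.2 then s.1 + pvT c g (m.toNat + k) - pvT c g k
          else s.2)) _
      (by
        intro st k _
        have e2 : m + (k : Int) - m = ((k : Nat) : Int) := by ring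
        have e1 : m + (k : Int) = ((m.toNat + k : Nat) : Int) := by push_cast; omega
        rw [e2, e1]
        simp only [PySem.List.pyGetD_natCast, pvT])]
    rw [show ((c.length : Int) - m).toNat = c.length - m.toNat from by omega]
    rw [pv_slide c g m.toNat (c.length - m.toNat)]
    have hM : (List.range (c.length - m.toNat + 1)).foldl (fun a j => max a (pvW c g m.toNat j)) 0
        = max 0 ((List.range (c.length - m.toNat)).foldl
            (fun a j => max a (pvW c g m.toNat (j + 1))) (pvW c g m.toNat 0)) := by
      rw [List.range_succ_eq_map, List.foldl_cons, List.foldl_map]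
      simp only [Nat.succ_eq_add_one]
      exact pv_foldl_max_max _ _ 0 (pvW c g m.toNat 0)
    rw [hM, pv_ite_max]

-- ===== VERDICT (by name: the statement is the Claim_ definition above) =====
theorem gBookOwner_spec : Claim_equal_gBookOwner := by
  intro c g m _ hpre
  unfold Spec_gBookOwner
  exact pv_main c g m hpre
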